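-- pv_equiv track=rewrite | github.com/stkirk/cs-guided-project-searching-recursion | src/tasks/task5.py | sum_of_fibs
-- ===== SOURCE A (Python) =====
-- def sum_of_fibs(n):
--     # STEP 1: find fibonacci numbers with values up to n and put into a list
--     # edge case: if n is 1, return true
--     # if n == 1 or n == 2 or n == 3:
--     #     return True
--     # initialize list of fib numbers to append to
--     fibs = [0, 1]
--     # break while loop if fibs last index is greater than or equal to n
--     # init count to calculate fib number
--     count = 2
--     while n:
--         next_fib = fibs[count - 1] + fibs[count - 2]
--         if next_fib > n:
--             break
--         fibs.append(next_fib)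
--         count += 1
--
--     # STEP 2: search through fibs to see if two indicies add up to target n
--
--     # init a dict with the complement of each integer and n as keys and their index as values
--     complements = {(n - fib): True for fib in fibs}
--
--     # loop through fibs
--     for fib in fibs:
--         # if a complement exists in list of fibonacci nums, we have a good sum, return True
--         if fib in complements:
--             return True
--     # loop finished without finding a complement, return false
--     return False
-- ===== SOURCE B (Python) =====
-- def sum_of_fibs(n):
--     # build the same list of Fibonacci numbers <= n
--     fibs = [0, 1]
--     while fibs[-1] + fibs[-2] <= n:
--         fibs.append(fibs[-1] + fibs[-2])
--     # nested pair scan instead of a complement dict + membership loop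
--     return any(a + b == n for a in fibs for b in fibs)
-- ===== Notes on version B (the rewrite author's own statement) =====
-- stated objective: simpler
-- what changed: The complement-dict construction plus membership loop of the search step is replaced by a direct nested scan over all ordered pairs of the Fibonacci list; the Fibonacci-generation loop is kept, written with negative indexing instead of a count variable.
import Mathlib
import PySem

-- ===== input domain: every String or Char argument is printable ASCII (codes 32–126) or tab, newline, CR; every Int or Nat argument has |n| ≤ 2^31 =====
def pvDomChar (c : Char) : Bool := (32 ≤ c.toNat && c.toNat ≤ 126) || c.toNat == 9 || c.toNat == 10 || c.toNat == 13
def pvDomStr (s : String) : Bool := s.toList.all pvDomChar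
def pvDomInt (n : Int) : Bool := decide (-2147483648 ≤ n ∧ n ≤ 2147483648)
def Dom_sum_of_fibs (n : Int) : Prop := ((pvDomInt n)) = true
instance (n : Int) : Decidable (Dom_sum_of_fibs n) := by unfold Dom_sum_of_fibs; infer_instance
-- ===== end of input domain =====

-- B replaces A's complement-dict + membership loop by a plain nested scan over all pairs of the Fibonacci list (simpler; same result).


-- ===== PORT A =====
-- A's 'while n:' loop; fuel is only a totality guard (each iteration appends a value ≤ n and the
-- running pair-sum grows by ≥ 1 each step, so n.toNat + 2 steps are never exhausted); the indices
-- count-1 / count-2 are always in range since count = len(fibs), so pyGetD's default is never used.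
def pvFibLoopA (n : Int) : Nat → List Int → Int → List Int
  | 0, fibs, _ => fibs
  | fuel + 1, fibs, count =>
      if n = 0 then fibs
      else
        let next_fib := PySem.List.pyGetD fibs (count - 1) 0 + PySem.List.pyGetD fibs (count - 2) 0
        if next_fib > n then fibs
        else pvFibLoopA n fuel (fibs ++ [next_fib]) (count + 1)

-- A's 'for fib in fibs: if fib in complements: return True' early-return loop
def pvSearchA (complements : PySem.Dict Int Bool) : List Int → Bool
  | [] => false
  | fib :: rest => if complements.contains fib then true else pvSearchA complements rest

def sum_of_fibs (n : Int) : Bool :=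
  let fibs := pvFibLoopA n (n.toNat + 2) [0, 1] 2
  let complements :=
    fibs.foldl (fun d fib => d.insert (n - fib) true) (PySem.Dict.empty : PySem.Dict Int Bool)
  pvSearchA complements fibs

-- ===== PORT B =====
-- B's 'while fibs[-1] + fibs[-2] <= n:' loop, same fuel guard as A's port
def pvFibLoopB (n : Int) : Nat → List Int → List Int
  | 0, fibs => fibs
  | fuel + 1, fibs =>
      if PySem.List.pyGetD fibs (-1) 0 + PySem.List.pyGetD fibs (-2) 0 ≤ n then
        pvFibLoopB n fuel (fibs ++ [PySem.List.pyGetD fibs (-1) 0 + PySem.List.pyGetD fibs (-2) 0])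
      else fibs

def sum_of_fibs_alt (n : Int) : Bool :=
  let fibs := pvFibLoopB n (n.toNat + 2) [0, 1]
  fibs.any (fun a => fibs.any (fun b => a + b == n))

-- ===== PRECONDITION & SPEC =====
def Spec_sum_of_fibs (n : Int) (out : Bool) : Prop := out = sum_of_fibs_alt n
instance (n : Int) (out : Bool) : Decidable (Spec_sum_of_fibs n out) := by unfold Spec_sum_of_fibs; infer_instance

-- ===== CLAIM (what is proved, stated in full; the proofs are below) =====
def Claim_equal_sum_of_fibs : Prop := ∀ (n : Int), Dom_sum_of_fibs n → Spec_sum_of_fibs n (sum_of_fibs n)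

-- ===== LEMMAS AND PROOFS =====

-- the two Fibonacci-generation loops walk in lockstep
theorem pvFibLoop_eq (n : Int) (fuel : Nat) :
    ∀ (fibs : List Int), 2 ≤ fibs.length →
      0 ≤ fibs.getD (fibs.length - 2) 0 → 1 ≤ fibs.getD (fibs.length - 1) 0 →
    pvFibLoopA n fuel fibs (fibs.length : Int) = pvFibLoopB n fuel fibs := by
  induction fuel with
  | zero => intro fibs _ _ _; rfl
  | succ fuel ih =>
    intro fibs h2 hsl hl
    have hga : PySem.List.pyGetD fibs ((fibs.length : Int) - 1) 0 = fibs.getD (fibs.length - 1) 0 := by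
      rw [PySem.List.pyGetD_eq_getElem fibs 0 (by omega) (by omega),
          List.getD_eq_getElem _ _ (by omega)]
      congr 1; omega
    have hgb : PySem.List.pyGetD fibs ((fibs.length : Int) - 2) 0 = fibs.getD (fibs.length - 2) 0 := by
      rw [PySem.List.pyGetD_eq_getElem fibs 0 (by omega) (by omega),
          List.getD_eq_getElem _ _ (by omega)]
      congr 1; omega
    have hna : PySem.List.pyGetD fibs (-1) 0 = fibs.getD (fibs.length - 1) 0 := by
      rw [PySem.List.pyGetD_neg_ofNat fibs 1 0 (by omega) (by omega),
          List.getD_eq_getElem _ _ (by omega)]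
    have hnb : PySem.List.pyGetD fibs (-2) 0 = fibs.getD (fibs.length - 2) 0 := by
      rw [PySem.List.pyGetD_neg_ofNat fibs 2 0 (by omega) (by omega),
          List.getD_eq_getElem _ _ (by omega)]
    simp only [pvFibLoopA, pvFibLoopB, hga, hgb, hna, hnb]
    by_cases hn : n = 0
    · subst hn
      rw [if_pos rfl, if_neg (by omega)]
    · rw [if_neg hn]
      by_cases hbig : fibs.getD (fibs.length - 1) 0 + fibs.getD (fibs.length - 2) 0 > n
      · rw [if_pos hbig, if_neg (by omega)]
      · rw [if_neg hbig, if_pos (by omega)]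
        set v := fibs.getD (fibs.length - 1) 0 + fibs.getD (fibs.length - 2) 0 with hv
        have hv1 : 1 ≤ v := by omega
        have := ih (fibs ++ [v]) (by simp; omega)
          (by simp only [List.length_append, List.length_singleton]
              rw [List.getD_append _ _ _ _ (by omega)]
              have he : fibs.length + 1 - 2 = fibs.length - 1 := by omega
              rw [he]; omega)
          (by simpa [List.getD_append_right] using hv1)
        rw [← this]
        congr 1
        simp

-- A's early-return membership loop is an 'any' over dict membership
theorem pvSearchA_eq_any (d : PySem.Dict Int Bool) (l : List Int) :
    pvSearchA d l = l.any (fun f => d.contains f) := by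
  induction l with
  | nil => rfl
  | cons x xs ih => by_cases h : d.contains x <;> simp [pvSearchA, h, ih]

-- membership in the complement dict is existence of a partner summing to n
theorem contains_complements (n : Int) (fibs : List Int) (x : Int) :
    (fibs.foldl (fun d fib => d.insert (n - fib) true)
        (PySem.Dict.empty : PySem.Dict Int Bool)).contains x = true ↔ ∃ b ∈ fibs, n - b = x := by
  rw [PySem.Dict.contains_iff_mem_keys,
      PySem.Dict.keys_foldl_insert_key fibs (fun fib => n - fib) (fun _ _ => true) PySem.Dict.empty,
      PySem.Dict.keys_empty,
      show PySem.Set.update ([] : List Int) (fibs.map (fun fib => n - fib))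
        = PySem.Set.ofList (fibs.map (fun fib => n - fib)) from rfl,
      PySem.Set.mem_ofList]
  simp

-- ===== VERDICT (by name: the statement is the Claim_ definition above) =====
theorem sum_of_fibs_spec : Claim_equal_sum_of_fibs := by
  intro n _
  unfold Spec_sum_of_fibs sum_of_fibs sum_of_fibs_alt
  have hfib : pvFibLoopA n (n.toNat + 2) [0, 1] 2 = pvFibLoopB n (n.toNat + 2) [0, 1] := by
    have := pvFibLoop_eq n (n.toNat + 2) [0, 1] (by simp) (by simp) (by simp)
    simpa using this
  rw [hfib]
  set fibs := pvFibLoopB n (n.toNat + 2) [0, 1] with hf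
  rw [pvSearchA_eq_any]
  rw [Bool.eq_iff_iff]
  simp only [List.any_eq_true]
  constructor
  · rintro ⟨a, ha, hc⟩
    obtain ⟨b, hb, hab⟩ := (contains_complements n fibs a).mp hc
    exact ⟨a, ha, b, hb, by simp; omega⟩
  · rintro ⟨a, ha, b, hb, hab⟩
    refine ⟨a, ha, (contains_complements n fibs a).mpr ⟨b, hb, by simp at hab; omega⟩⟩
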